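-- pv_equiv track=rewrite | github.com/JH-TT/Coding_Practice | Programmers/BruteForce_P/64064.py | solution
-- ===== SOURCE A (Python) =====
-- from collections import defaultdict
-- from itertools import product
--
-- def solution(user_id, banned_id):
--     # ban당한 아이디인지 확인
--     def match_id(a, b):
--         if len(a) != len(b):
--             return False
--         else:
--             for i in range(len(a)):
--                 if b[i] == "*":
--                     continue
--                 if a[i] != b[i]:
--                     return False
--         return True
--     # 각 불량사용자 경우에 맞는 유저들
--     proper_id = defaultdict(list)
--
--     # 가려진 부분을 제외한 나머지 부분이 일치하는 유저들 맞게 넣는 코드.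
--     for i in set(banned_id):
--         for j in user_id:
--             if match_id(j, i):
--                 proper_id[i].append(j)
--     arr = [] # 모든 불량 사용자 유력후보들 넣는곳
--     for i in banned_id:
--         arr.append(proper_id[i])
--
--     # 모든 경우
--     all_case = product(*arr)
--     real_case = []
--     for i in all_case:
--         # 중복되는 아이디가 없는 경우
--         if len(i) == len(set(i)):
--             # 순서가 달라도 유저목록의 내용이 동일하면 같은 것으로 처리하기 위함.
--             sort_case = sorted(list(i))
--             # 이미 같은 유저 목록이 있는지 확인
--             # 없으면 추가
--             if sort_case not in real_case:
--                 real_case.append(sort_case)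
--
--     return len(real_case)
-- ===== SOURCE B (Python) =====
-- def solution(user_id, banned_id):
--     # Candidate users for a banned pattern: same length, every non-'*' char equal.
--     def matches(u, b):
--         return len(u) == len(b) and all(bc == "*" or uc == bc for uc, bc in zip(u, b))
--
--     cands = [[u for u in user_id if matches(u, b)] for b in banned_id]
--
--     result = set()
--
--     def go(d, chosen):
--         if d == len(cands):
--             result.add(tuple(sorted(chosen)))
--             return
--         for c in cands[d]:
--             if c not in chosen:
--                 chosen.append(c)
--                 go(d + 1, chosen)
--                 chosen.pop()
--
--     go(0, [])
--     return len(result)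
-- ===== Notes on version B (the rewrite author's own statement) =====
-- stated objective: alternative
-- what changed: Replaces itertools.product over all candidate tuples plus a distinctness filter and a quadratic 'sorted list not in result list' dedup scan with a recursive backtracking search that prunes already-chosen users at each depth and collects sorted tuples into a hash set.
import Mathlib
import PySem

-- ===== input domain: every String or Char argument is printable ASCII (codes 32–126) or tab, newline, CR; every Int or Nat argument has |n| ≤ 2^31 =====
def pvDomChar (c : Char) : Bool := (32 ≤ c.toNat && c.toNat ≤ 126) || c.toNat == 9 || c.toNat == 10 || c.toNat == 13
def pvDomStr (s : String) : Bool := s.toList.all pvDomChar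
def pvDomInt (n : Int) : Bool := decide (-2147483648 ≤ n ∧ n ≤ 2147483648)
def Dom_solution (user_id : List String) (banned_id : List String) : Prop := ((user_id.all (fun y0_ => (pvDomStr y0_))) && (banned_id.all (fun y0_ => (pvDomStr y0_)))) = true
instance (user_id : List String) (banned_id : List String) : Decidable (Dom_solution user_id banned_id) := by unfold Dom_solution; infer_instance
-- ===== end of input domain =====

-- B replaces A's full itertools.product enumeration + distinctness filter + quadratic list
-- dedup scan by a pruning backtracking search collecting sorted tuples into a set (alternative decomposition).

-- ===== PORT A =====

-- match_id(a, b): index loop over range(len(a))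
def matchIdA (a b : String) : Bool :=
  if a.toList.length ≠ b.toList.length then false
  else
    (PySem.List.pyRange 0 (a.toList.length : Int) 1).foldl
      (fun ok i =>
        if PySem.List.pyGetD b.toList i ' ' = '*' then ok
        else if PySem.List.pyGetD a.toList i ' ' ≠ PySem.List.pyGetD b.toList i ' ' then false
        else ok)
      true

-- itertools.product(*arr), tuples as lists, in product's lexicographic order
def pyProductA (arr : List (List String)) : List (List String) :=
  match arr with
  | [] => [[]]
  | cs :: rest => cs.flatMap (fun c => (pyProductA rest).map (fun t => c :: t))

def solution (user_id : List String) (banned_id : List String) : Int :=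
  -- proper_id = defaultdict(list); for i in set(banned_id): for j in user_id: if match_id(j,i): proper_id[i].append(j)
  let proper : PySem.Dict String (List String) :=
    (PySem.Set.ofList banned_id).foldl
      (fun d i =>
        user_id.foldl
          (fun d j => if matchIdA j i then d.modify i [] (fun l => l ++ [j]) else d)
          d)
      PySem.Dict.empty
  -- arr = [proper_id[i] for i in banned_id]  (defaultdict lookup: missing key gives [])
  let arr : List (List String) :=
    banned_id.foldl (fun acc i => acc ++ [proper.getD i []]) []
  -- for i in product(*arr): if len(i)==len(set(i)): sort_case = sorted(i); if sort_case not in real_case: append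
  let realCase : List (List String) :=
    (pyProductA arr).foldl
      (fun rc t =>
        if PySem.Set.len (PySem.Set.ofList t) = (t.length : Int) then
          let sc := PySem.List.sorted t (fun x => x) false
          if rc.contains sc then rc else rc ++ [sc]
        else rc)
      []
  (realCase.length : Int)

-- ===== PORT B =====

-- matches(u, b): len equal and all over zip
def matchesB (u b : String) : Bool :=
  u.toList.length == b.toList.length &&
    (u.toList.zip b.toList).all (fun p => p.2 == '*' || p.1 == p.2)

-- go(d, chosen): backtracking over the remaining candidate lists, adding sorted(chosen) at the leaves
def goB (cands : List (List String)) (chosen : List String)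
    (res : PySem.Set (List String)) : PySem.Set (List String) :=
  match cands with
  | [] => PySem.Set.add res (PySem.List.sorted chosen (fun x => x) false)
  | cs :: rest =>
      cs.foldl
        (fun res c => if chosen.contains c then res else goB rest (chosen ++ [c]) res)
        res

def solution_alt (user_id : List String) (banned_id : List String) : Int :=
  let cands : List (List String) :=
    banned_id.map (fun b => user_id.filter (fun u => matchesB u b))
  ((goB cands [] PySem.Set.empty).length : Int)

-- ===== PRECONDITION & SPEC =====
def Spec_solution (user_id : List String) (banned_id : List String) (out : Int) : Prop := out = solution_alt user_id banned_id
instance (user_id : List String) (banned_id : List String) (out : Int) : Decidable (Spec_solution user_id banned_id out) := by unfold Spec_solution; infer_instance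

-- ===== CLAIM (what is proved, stated in full; the proofs are below) =====
def Claim_equal_solution : Prop := ∀ (user_id : List String) (banned_id : List String), Dom_solution user_id banned_id → Spec_solution user_id banned_id (solution user_id banned_id)

-- ===== LEMMAS AND PROOFS =====

theorem foldl_and_all {α : Type} (l : List α) (q : α → Bool) (b : Bool) :
    l.foldl (fun ok x => ok && q x) b = (b && l.all q) := by
  induction l generalizing b with
  | nil => simp
  | cons x t ih => simp [List.foldl_cons, ih, Bool.and_assoc]

theorem range_all_zip (as bs : List Char) (h : as.length = bs.length)
    (p : Char × Char → Bool) :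
    (PySem.List.pyRange 0 (as.length : Int) 1).all
        (fun i => p (PySem.List.pyGetD as i ' ', PySem.List.pyGetD bs i ' '))
      = (as.zip bs).all p := by
  have hz : (as.zip bs).length = as.length := by simp [h]
  conv_rhs => rw [← PySem.List.map_pyGetD_pyRange_zero' (as.zip bs) (' ', ' ')]
  rw [List.all_map, hz]
  rw [Bool.eq_iff_iff, List.all_eq_true, List.all_eq_true]
  constructor <;> intro hall i hi <;>
  · have hmem := (PySem.List.mem_pyRange_one.mp hi)
    obtain ⟨k, rfl⟩ : ∃ k : Nat, i = (k : Int) := ⟨i.toNat, by omega⟩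
    have hk : k < as.length := by exact_mod_cast hmem.2
    have e1 : PySem.List.pyGetD as (k : Int) ' ' = as.getD k ' ' := PySem.List.pyGetD_natCast as k ' '
    have e2 : PySem.List.pyGetD bs (k : Int) ' ' = bs.getD k ' ' := PySem.List.pyGetD_natCast bs k ' '
    have e3 : PySem.List.pyGetD (as.zip bs) (k : Int) (' ', ' ') = (as.zip bs).getD k (' ', ' ') :=
      PySem.List.pyGetD_natCast _ k _
    have hkz : k < (as.zip bs).length := by simp [h]; omega
    have e4 : (as.zip bs).getD k (' ', ' ') = (as.getD k ' ', bs.getD k ' ') := by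
      rw [List.getD_eq_getElem _ _ hkz, List.getD_eq_getElem _ _ hk,
        List.getD_eq_getElem _ _ (by omega : k < bs.length), List.getElem_zip]
    have := hall ((k : Int)) hi
    simp_all

theorem match_eq (a b : String) : matchIdA a b = matchesB a b := by
  unfold matchIdA matchesB
  by_cases h : a.toList.length = b.toList.length
  · have hstep : (fun (ok : Bool) (i : Int) =>
        if PySem.List.pyGetD b.toList i ' ' = '*' then ok
        else if PySem.List.pyGetD a.toList i ' ' ≠ PySem.List.pyGetD b.toList i ' ' then false
        else ok)
      = fun ok i => ok &&
          (fun q : Char × Char => (q.2 == '*' || q.1 == q.2))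
            (PySem.List.pyGetD a.toList i ' ', PySem.List.pyGetD b.toList i ' ') := by
      funext ok i
      by_cases h1 : PySem.List.pyGetD b.toList i ' ' = '*' <;>
        by_cases h2 : PySem.List.pyGetD a.toList i ' ' = PySem.List.pyGetD b.toList i ' ' <;>
        simp [h1, h2]
    rw [if_neg (by simpa using h), hstep, foldl_and_all,
      range_all_zip a.toList b.toList h (fun q => (q.2 == '*' || q.1 == q.2)), Bool.true_and,
      show (a.toList.length == b.toList.length) = true by simp [h], Bool.true_and]
  · rw [if_pos (by simpa using h),
      show (a.toList.length == b.toList.length) = false by simpa [← String.length_toList] using h, Bool.false_and]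

theorem inner_getD (user_id : List String) (k c : String) (d : PySem.Dict String (List String)) :
    (user_id.foldl
        (fun d j => if matchIdA j k then d.modify k [] (fun l => l ++ [j]) else d) d).getD c []
      = if c = k then d.getD c [] ++ user_id.filter (fun j => matchIdA j k)
        else d.getD c [] := by
  have h1 : user_id.foldl
        (fun d j => if matchIdA j k then d.modify k [] (fun l => l ++ [j]) else d) d
      = (user_id.filter (fun j => matchIdA j k)).foldl
          (fun d j => d.modify k [] (fun l => l ++ [j])) d :=
    PySem.List.foldl_if_eq_foldl_filter _ _ _ _
  have h2 : (user_id.filter (fun j => matchIdA j k)).foldl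
        (fun d j => d.modify k [] (fun l => l ++ [j])) d
      = ((user_id.filter (fun j => matchIdA j k)).map (fun j => (k, j))).foldl
          (fun d p => d.modify p.1 [] (fun l => l ++ [p.2])) d := by
    rw [List.foldl_map]
  rw [h1, h2, PySem.Dict.getD_foldl_modify_append]
  by_cases hc : c = k
  · subst hc; simp [List.filter_map, Function.comp_def]
  · have : ((user_id.filter (fun j => matchIdA j k)).map (fun j => (k, j))).filter
        (fun p => p.1 == c) = [] := by
      rw [List.filter_eq_nil_iff]
      intro p hp
      simp only [List.mem_map, List.mem_filter] at hp
      obtain ⟨j, _, rfl⟩ := hp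
      simp [Ne.symm hc]
    rw [this]; simp [hc]

theorem keys_fold_getD (user_id : List String) (ks : List String) (hk : ks.Nodup)
    (d : PySem.Dict String (List String)) (i : String) :
    ((ks.foldl
        (fun d k =>
          user_id.foldl
            (fun d j => if matchIdA j k then d.modify k [] (fun l => l ++ [j]) else d) d)
        d).getD i [])
      = if i ∈ ks then d.getD i [] ++ user_id.filter (fun j => matchIdA j i)
        else d.getD i [] := by
  induction ks generalizing d with
  | nil => simp
  | cons k ks ih =>
    rw [List.foldl_cons, ih (List.nodup_cons.mp hk).2, inner_getD]
    by_cases hik : i = k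
    · subst hik
      have := (List.nodup_cons.mp hk).1
      simp [this]
    · simp [hik, List.mem_cons]

theorem arr_eq (user_id banned_id : List String) :
    banned_id.foldl
      (fun acc i =>
        acc ++ [((PySem.Set.ofList banned_id).foldl
          (fun d i =>
            user_id.foldl
              (fun d j => if matchIdA j i then d.modify i [] (fun l => l ++ [j]) else d) d)
          PySem.Dict.empty).getD i []]) []
    = banned_id.map (fun b => user_id.filter (fun u => matchesB u b)) := by
  rw [PySem.List.foldl_append_singleton_eq_map, List.nil_append]
  apply List.map_congr_left
  intro i hi
  rw [keys_fold_getD user_id _ (PySem.Set.nodup_ofList banned_id) _ i,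
    if_pos ((PySem.Set.mem_ofList banned_id i).mpr hi)]
  simp only [PySem.Dict.getD_empty, List.nil_append]
  exact List.filter_congr (fun j _ => by rw [match_eq])

-- the list of sorted complete tuples visited by goB, in visit order
def enumB (cands : List (List String)) (chosen : List String) : List (List String) :=
  match cands with
  | [] => [PySem.List.sorted chosen (fun x => x) false]
  | cs :: rest =>
      (cs.filter (fun c => !chosen.contains c)).flatMap (fun c => enumB rest (chosen ++ [c]))

theorem set_update_append {α : Type} [BEq α] (s : PySem.Set α) (l1 l2 : List α) :
    PySem.Set.update s (l1 ++ l2) = PySem.Set.update (PySem.Set.update s l1) l2 := by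
  simp [PySem.Set.update, List.foldl_append]

theorem goB_eq_update (cands : List (List String)) (chosen : List String)
    (res : PySem.Set (List String)) :
    goB cands chosen res = PySem.Set.update res (enumB cands chosen) := by
  induction cands generalizing chosen res with
  | nil => simp [goB, enumB, PySem.Set.update]
  | cons cs rest ih =>
    rw [goB, enumB]
    induction cs generalizing res with
    | nil => simp [PySem.Set.update]
    | cons c cs' ih2 =>
      rw [List.foldl_cons]
      by_cases hc : chosen.contains c
      · rw [if_pos hc, ih2, List.filter_cons_of_neg (by simpa using hc)]
      · rw [if_neg hc, ih2, ih, List.filter_cons_of_pos (by simpa using hc),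
          List.flatMap_cons, set_update_append]

theorem flatMap_filter_eq {α β : Type} (l : List α) (q : α → Bool) (g : α → List β) :
    (l.filter q).flatMap g = l.flatMap (fun c => if q c then g c else []) := by
  induction l with
  | nil => rfl
  | cons c t ih =>
    by_cases hq : q c
    · rw [List.filter_cons_of_pos hq, List.flatMap_cons, List.flatMap_cons, if_pos hq, ih]
    · rw [List.filter_cons_of_neg (by simpa using hq), List.flatMap_cons,
        if_neg (by simpa using hq), List.nil_append, ih]

theorem enumB_eq_product (cands : List (List String)) (chosen : List String)
    (hch : chosen.Nodup) :
    enumB cands chosen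
      = ((pyProductA cands).filter (fun t => decide (chosen ++ t).Nodup)).map
          (fun t => PySem.List.sorted (chosen ++ t) (fun x => x) false) := by
  induction cands generalizing chosen with
  | nil =>
    rw [enumB, pyProductA]
    simp [hch]
  | cons cs rest ih =>
    rw [enumB, pyProductA, List.filter_flatMap, List.map_flatMap, flatMap_filter_eq]
    apply List.flatMap_congr
    intro c hc
    by_cases hm : chosen.contains c
    · have hcm : c ∈ chosen := by simpa using hm
      rw [if_neg (by simpa using hm)]
      have : ((pyProductA rest).map (fun t => c :: t)).filter
          (fun t => decide (chosen ++ t).Nodup) = [] := by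
        rw [List.filter_eq_nil_iff]
        intro t ht
        simp only [List.mem_map] at ht
        obtain ⟨t', _, rfl⟩ := ht
        simp only [decide_eq_true_eq]
        intro hnd
        exact (List.disjoint_of_nodup_append hnd) hcm List.mem_cons_self
      rw [this, List.map_nil]
    · have hcm : c ∉ chosen := by simpa using hm
      have hb : chosen.contains c = false := Bool.not_eq_true _ ▸ eq_false_of_ne_true hm
      have hnd2 : (chosen ++ [c]).Nodup := by
        rw [List.nodup_append]
        refine ⟨hch, List.nodup_singleton c, ?_⟩
        intro a ha b hb2
        rw [List.mem_singleton] at hb2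
        subst hb2
        exact fun h => hcm (h ▸ ha)
      rw [if_pos (by rw [hb]; rfl), ih (chosen ++ [c]) hnd2,
        List.filter_map, List.map_map]
      have hfun : ∀ t : List String, (chosen ++ [c]) ++ t = chosen ++ c :: t := by
        intro t; rw [List.append_assoc, List.singleton_append]
      congr 1
      · funext t
        simp [Function.comp_def, hfun t]
      · apply List.filter_congr
        intro t _
        simp [Function.comp_def, hfun t]

theorem nodup_test (t : List String) :
    (PySem.Set.len (PySem.Set.ofList t) = (t.length : Int)) ↔ t.Nodup := by
  constructor
  · intro h
    have hlen : (PySem.Set.ofList t).length = t.length := by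
      simpa [PySem.Set.len] using h
    have hfin : (PySem.Set.ofList t).toFinset = t.toFinset := by
      ext x; simp [List.mem_toFinset, PySem.Set.mem_ofList]
    have h1 : (PySem.Set.ofList t).toFinset.card = (PySem.Set.ofList t).length :=
      List.toFinset_card_of_nodup (PySem.Set.nodup_ofList t)
    have h2 : t.toFinset.card = t.dedup.length := List.card_toFinset t
    have h3 : t.dedup.length = t.length := by
      rw [← h2, ← hfin, h1, hlen]
    have h4 : t.dedup = t := (List.dedup_sublist t).eq_of_length h3
    exact h4 ▸ t.nodup_dedup
  · intro h
    rw [PySem.Set.ofList_eq_self_of_nodup _ h]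
    simp [PySem.Set.len]

theorem main_eq (u bid : List String) : solution u bid = solution_alt u bid := by
  unfold solution solution_alt
  simp only
  rw [arr_eq u bid, goB_eq_update, enumB_eq_product _ [] List.nodup_nil]
  have hstep : (fun (rc : List (List String)) (t : List String) =>
      if PySem.Set.len (PySem.Set.ofList t) = (t.length : Int) then
        let sc := PySem.List.sorted t (fun x => x) false
        if rc.contains sc then rc else rc ++ [sc]
      else rc)
    = fun rc t => if (t.Nodup) then
        PySem.Set.add rc (PySem.List.sorted t (fun x => x) false) else rc := by
    funext rc t
    rw [if_congr (nodup_test t) rfl rfl]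
    by_cases h : t.Nodup
    · rw [if_pos h, if_pos h]
      rfl
    · rw [if_neg h, if_neg h]
  rw [hstep, PySem.List.foldl_ite_eq_foldl_filter,
    ← PySem.Set.update_map_eq_foldl_add]
  simp only [List.nil_append]
  rfl

-- ===== VERDICT (by name: the statement is the Claim_ definition above) =====
theorem solution_spec : Claim_equal_solution := by
  intro u bid _
  unfold Spec_solution
  exact main_eq u bid
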